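-- pv_equiv track=rewrite | github.com/epilectrik/voynich | phases/GLOSS_STRUCTURAL_VALIDATION/scripts/gloss_structural_validation.py | count_distinct_cat_pairs
-- ===== SOURCE A (Python) =====
-- GLOSS_CATEGORIES = {
--     'THERMAL': [
--         'cool', 'heat', 'fire', 'warm', 'deep', 'extended', 'overnight',
--         'settle', 'steady',
--     ],
--     'CONTAINMENT': [
--         'seal', 'close', 'lock', 'frame', 'hold', 'bind', 'rigid', 'firm',
--         'hard',
--     ],
--     'FLOW': [
--         'intake', 'open', 'transfer', 'collect', 'gather', 'route',
--         'discharge', 'vent', 'release', 'pour',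
--     ],
--     'MONITORING': [
--         'check', 'watch', 'verify', 'scan', 'observe', 'control', 'exact',
--         'precise', 'measure', 'danger', 'hazard',
--     ],
--     'OPERATION': [
--         'set', 'portion', 'work', 'operate', 'step', 'pound', 'strip',
--         'adjust', 'regulate', 'pulse', 'sustain',
--     ],
--     'TRANSITION': [
--         'end', 'break', 'halt', 'finish', 'finalize', 'yield', 'pause',
--         'complete',
--     ],
--     'STAGING': [
--         'start', 'early', 'mid', 'late', 'final', 'batch', 'cycle',
--         'iterate', 'repeat', 'continue', 'loop',
--     ],
--     'STRUCTURAL': [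
--         'stand', 'flag', 'mark', 'path', 'link', 'diagram', 'bond',
--         'dense', 'wide', 'long',
--     ],
-- }
--
-- def categorize_gloss(gloss):
--     """Assign a gloss string to a pre-registered category."""
--     if not gloss:
--         return 'UNGLOSSED'
--     gloss_lower = gloss.lower()
--     for cat, keywords in GLOSS_CATEGORIES.items():
--         for kw in keywords:
--             if kw in gloss_lower:
--                 return cat
--     return 'OTHER'
--
-- def count_distinct_cat_pairs(mid_to_gloss, pairs):
--     """Count distinct directed (source_cat, target_cat) pairs."""
--     cat_pairs = set()
--     for s, t in pairs:
--         s_gloss = mid_to_gloss.get(s)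
--         t_gloss = mid_to_gloss.get(t)
--         s_cat = categorize_gloss(s_gloss)
--         t_cat = categorize_gloss(t_gloss)
--         cat_pairs.add((s_cat, t_cat))
--     return len(cat_pairs)
-- ===== SOURCE B (Python) =====
-- GLOSS_CATEGORIES = {
--     'THERMAL': [
--         'cool', 'heat', 'fire', 'warm', 'deep', 'extended', 'overnight',
--         'settle', 'steady',
--     ],
--     'CONTAINMENT': [
--         'seal', 'close', 'lock', 'frame', 'hold', 'bind', 'rigid', 'firm',
--         'hard',
--     ],
--     'FLOW': [
--         'intake', 'open', 'transfer', 'collect', 'gather', 'route',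
--         'discharge', 'vent', 'release', 'pour',
--     ],
--     'MONITORING': [
--         'check', 'watch', 'verify', 'scan', 'observe', 'control', 'exact',
--         'precise', 'measure', 'danger', 'hazard',
--     ],
--     'OPERATION': [
--         'set', 'portion', 'work', 'operate', 'step', 'pound', 'strip',
--         'adjust', 'regulate', 'pulse', 'sustain',
--     ],
--     'TRANSITION': [
--         'end', 'break', 'halt', 'finish', 'finalize', 'yield', 'pause',
--         'complete',
--     ],
--     'STAGING': [
--         'start', 'early', 'mid', 'late', 'final', 'batch', 'cycle',
--         'iterate', 'repeat', 'continue', 'loop',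
--     ],
--     'STRUCTURAL': [
--         'stand', 'flag', 'mark', 'path', 'link', 'diagram', 'bond',
--         'dense', 'wide', 'long',
--     ],
-- }
--
-- # Categories as small integers: 0..7 the categories in GLOSS_CATEGORIES order,
-- # 8 = OTHER, 9 = UNGLOSSED.  A flattened (keyword, category-index) list lets a
-- # single filtered minimum replace the nested first-match scan.
-- FLAT_KW = [(kw, i) for i, kws in enumerate(GLOSS_CATEGORIES.values()) for kw in kws]
--
--
-- def cat_index(gloss):
--     """Category index of a gloss: the smallest category index any of whose
--     keywords occurs in the gloss (= the first matching category)."""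
--     if not gloss:
--         return 9
--     g = gloss.lower()
--     hits = [i for kw, i in FLAT_KW if kw in g]
--     return min(hits) if hits else 8
--
--
-- def count_distinct_cat_pairs(mid_to_gloss, pairs):
--     """Count distinct directed (source_cat, target_cat) pairs.
--
--     Classifies each gloss once in a single pass over mid_to_gloss, then marks
--     each pair in a 10x10 incidence matrix (flat bytearray) and sums the marks.
--     """
--     idx_of = {mid: cat_index(gloss) for mid, gloss in mid_to_gloss.items()}
--     seen = bytearray(100)
--     for s, t in pairs:
--         seen[10 * idx_of.get(s, 9) + idx_of.get(t, 9)] = 1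
--     return sum(seen)
-- ===== Notes on version B (the rewrite author's own statement) =====
-- stated objective: alternative
-- what changed: B replaces the per-pair nested keyword scan and the set of (category,category) string tuples by a different pipeline: each gloss is classified once in a single pass over mid_to_gloss using a flattened (keyword, category-index) list and a filtered minimum, categories become small integers, and distinct pairs are counted by marking a flat 10x10 incidence matrix (bytearray) and summing it.
import Mathlib
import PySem

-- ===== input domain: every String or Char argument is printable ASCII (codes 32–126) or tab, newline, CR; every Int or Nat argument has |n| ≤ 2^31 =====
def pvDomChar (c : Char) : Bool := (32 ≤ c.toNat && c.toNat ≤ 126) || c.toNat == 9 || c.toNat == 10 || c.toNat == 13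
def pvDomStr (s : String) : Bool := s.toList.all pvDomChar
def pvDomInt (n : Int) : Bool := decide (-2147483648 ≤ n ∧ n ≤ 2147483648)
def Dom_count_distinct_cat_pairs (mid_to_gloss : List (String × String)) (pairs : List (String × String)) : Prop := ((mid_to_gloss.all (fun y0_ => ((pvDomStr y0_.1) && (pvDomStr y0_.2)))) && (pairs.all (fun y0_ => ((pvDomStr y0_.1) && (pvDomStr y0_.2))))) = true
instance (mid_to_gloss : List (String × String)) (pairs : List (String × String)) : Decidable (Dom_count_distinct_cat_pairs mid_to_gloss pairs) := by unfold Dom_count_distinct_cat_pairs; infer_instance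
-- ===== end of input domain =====

-- B classifies each gloss ONCE in a single pass over mid_to_gloss (flattened
-- keyword list + minimum index instead of the nested first-match scan) and
-- counts distinct pairs as marks in a flat 10x10 incidence matrix.

-- ===== PORT A =====
-- module constant GLOSS_CATEGORIES (shared by both versions)
def GLOSS_CATEGORIES : List (String × List String) := [
  ("THERMAL", ["cool", "heat", "fire", "warm", "deep", "extended", "overnight",
    "settle", "steady"]),
  ("CONTAINMENT", ["seal", "close", "lock", "frame", "hold", "bind", "rigid", "firm",
    "hard"]),
  ("FLOW", ["intake", "open", "transfer", "collect", "gather", "route",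
    "discharge", "vent", "release", "pour"]),
  ("MONITORING", ["check", "watch", "verify", "scan", "observe", "control", "exact",
    "precise", "measure", "danger", "hazard"]),
  ("OPERATION", ["set", "portion", "work", "operate", "step", "pound", "strip",
    "adjust", "regulate", "pulse", "sustain"]),
  ("TRANSITION", ["end", "break", "halt", "finish", "finalize", "yield", "pause",
    "complete"]),
  ("STAGING", ["start", "early", "mid", "late", "final", "batch", "cycle",
    "iterate", "repeat", "continue", "loop"]),
  ("STRUCTURAL", ["stand", "flag", "mark", "path", "link", "diagram", "bond",
    "dense", "wide", "long"])]

-- the 'for cat, keywords in GLOSS_CATEGORIES.items()' loop (early return on first hit)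
def catScan (gloss_lower : String) : List (String × List String) → String
  | [] => "OTHER"
  | (cat, keywords) :: rest =>
      if keywords.any (fun kw => PySem.Str.isIn kw gloss_lower) then cat
      else catScan gloss_lower rest

-- categorize_gloss(gloss) where gloss may be None ('if not gloss' = None or "")
def categorize_gloss (gloss : Option String) : String :=
  match gloss with
  | none => "UNGLOSSED"
  | some g => if g = "" then "UNGLOSSED" else catScan (PySem.Str.lower g) GLOSS_CATEGORIES

def count_distinct_cat_pairs (mid_to_gloss : List (String × String)) (pairs : List (String × String)) : Int :=
  let cat_pairs : PySem.Set (String × String) :=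
    pairs.foldl (fun cat_pairs st =>
      let s_gloss := (PySem.Dict.mk mid_to_gloss).get? st.1
      let t_gloss := (PySem.Dict.mk mid_to_gloss).get? st.2
      let s_cat := categorize_gloss s_gloss
      let t_cat := categorize_gloss t_gloss
      cat_pairs.add (s_cat, t_cat)) PySem.Set.empty
  cat_pairs.len

-- ===== PORT B =====
-- FLAT_KW = [(kw, i) for i, kws in enumerate(GLOSS_CATEGORIES.values()) for kw in kws]
def flatKW : List (String × Int) :=
  (PySem.List.enumerate (GLOSS_CATEGORIES.map (·.2)) 0).flatMap
    (fun p => p.2.map (fun kw => (kw, p.1)))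

-- cat_index(gloss): 0..7 category indices, 8 = OTHER, 9 = UNGLOSSED
def cat_index (gloss : String) : Int :=
  if gloss = "" then 9
  else
    let g := PySem.Str.lower gloss
    let hits := (flatKW.filter (fun p => PySem.Str.isIn p.1 g)).map (·.2)
    match PySem.List.min? hits (fun x => x) with
    | some v => v
    | none => 8

def count_distinct_cat_pairs_alt (mid_to_gloss : List (String × String)) (pairs : List (String × String)) : Int :=
  -- idx_of = {mid: cat_index(gloss) for mid, gloss in mid_to_gloss.items()}
  let idx_of := PySem.Dict.mk (mid_to_gloss.map (fun p => (p.1, cat_index p.2)))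
  -- seen = bytearray(100); seen[10*i_s + i_t] = 1 for each pair; return sum(seen)
  let seen := pairs.foldl (fun (seen : List Int) st =>
      PySem.List.pySetD seen (10 * idx_of.getD st.1 9 + idx_of.getD st.2 9) 1)
    (List.replicate 100 (0 : Int))
  seen.sum

-- ===== PRECONDITION & SPEC =====
def Spec_count_distinct_cat_pairs (mid_to_gloss : List (String × String)) (pairs : List (String × String)) (out : Int) : Prop := out = count_distinct_cat_pairs_alt mid_to_gloss pairs
instance (mid_to_gloss : List (String × String)) (pairs : List (String × String)) (out : Int) : Decidable (Spec_count_distinct_cat_pairs mid_to_gloss pairs out) := by unfold Spec_count_distinct_cat_pairs; infer_instance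

-- ===== CLAIM (what is proved, stated in full; the proofs are below) =====
def Claim_equal_count_distinct_cat_pairs : Prop := ∀ (mid_to_gloss : List (String × String)) (pairs : List (String × String)), Dom_count_distinct_cat_pairs mid_to_gloss pairs → Spec_count_distinct_cat_pairs mid_to_gloss pairs (count_distinct_cat_pairs mid_to_gloss pairs)

-- ===== LEMMAS AND PROOFS =====

-- the ten category names, indexed by B's category index
def CATNAMES : List String :=
  ["THERMAL", "CONTAINMENT", "FLOW", "MONITORING", "OPERATION", "TRANSITION",
   "STAGING", "STRUCTURAL", "OTHER", "UNGLOSSED"]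

-- flatKW with an explicit running index (proof-side reformulation)
def flatOf (n : Int) : List (String × List String) → List (String × Int)
  | [] => []
  | (_, kws) :: rest => kws.map (fun kw => (kw, n)) ++ flatOf (n + 1) rest

lemma flat_enumerate (cats : List (String × List String)) (n : Int) :
    (PySem.List.enumerate (cats.map (·.2)) n).flatMap
      (fun p => p.2.map (fun kw => (kw, p.1))) = flatOf n cats := by
  induction cats generalizing n with
  | nil => rfl
  | cons c rest ih =>
      simp only [List.map_cons, PySem.List.enumerate_cons, List.flatMap_cons, flatOf]
      rw [ih]

lemma flatKW_eq : flatKW = flatOf 0 GLOSS_CATEGORIES := flat_enumerate _ 0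

-- category indices matched by a (lowered) gloss, starting index n
def hitsOf (n : Int) (cats : List (String × List String)) (g : String) : List Int :=
  ((flatOf n cats).filter (fun p => PySem.Str.isIn p.1 g)).map (·.2)

lemma hitsOf_def (n : Int) (cats : List (String × List String)) (g : String) :
    hitsOf n cats g = ((flatOf n cats).filter (fun p => PySem.Str.isIn p.1 g)).map (·.2) := rfl

lemma hitsOf_cons (n : Int) (c : String) (kws : List String)
    (rest : List (String × List String)) (g : String) :
    hitsOf n ((c, kws) :: rest) g
      = (kws.filter (fun kw => PySem.Str.isIn kw g)).map (fun _ => n) ++ hitsOf (n + 1) rest g := by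
  simp [hitsOf, flatOf, List.filter_append, List.filter_map, List.map_map, Function.comp_def]

lemma hitsOf_lb (cats : List (String × List String)) (n : Int) (g : String) :
    ∀ x ∈ hitsOf n cats g, n ≤ x := by
  induction cats generalizing n with
  | nil => intro x hx; simp [hitsOf, flatOf] at hx
  | cons c rest ih =>
      intro x hx
      rw [show c = (c.1, c.2) from rfl, hitsOf_cons] at hx
      rcases List.mem_append.mp hx with h | h
      · rcases List.mem_map.mp h with ⟨kw, _, rfl⟩; exact le_refl n
      · have := ih (n + 1) x h; omega

lemma hitsOf_ub (cats : List (String × List String)) (n : Int) (g : String) :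
    ∀ x ∈ hitsOf n cats g, x < n + cats.length := by
  induction cats generalizing n with
  | nil => intro x hx; simp [hitsOf, flatOf] at hx
  | cons c rest ih =>
      intro x hx
      rw [show c = (c.1, c.2) from rfl, hitsOf_cons] at hx
      rcases List.mem_append.mp hx with h | h
      · rcases List.mem_map.mp h with ⟨kw, _, rfl⟩; simp only [List.length_cons]; omega
      · have := ih (n + 1) x h; simp only [List.length_cons]; omega

lemma min?_eq_of (l : List Int) (n : Int) (hmem : n ∈ l) (hmin : ∀ x ∈ l, n ≤ x) :
    PySem.List.min? l (fun x => x) = some n := by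
  cases hm : PySem.List.min? l (fun x => x) with
  | none =>
      rw [PySem.List.min?_eq_none_iff _ _] at hm
      rw [hm] at hmem; simp at hmem
  | some m =>
      have h1 := PySem.List.min?_mem hm
      have h2 := PySem.List.min?_isMin hm n hmem
      have h3 := hmin m h1
      have : m = n := by omega
      rw [this]

-- the first-match scan equals the minimum matched index
lemma scan_eq_min (cats : List (String × List String)) (n : Int) (g : String) :
    catScan g cats
      = (match PySem.List.min? (hitsOf n cats g) (fun x => x) with
          | none => "OTHER"
          | some v => (cats.map (·.1)).getD (v - n).toNat "OTHER") := by
  induction cats generalizing n with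
  | nil =>
      have hnone : PySem.List.min? (hitsOf n [] g) (fun x => x) = none :=
        Iff.mpr (PySem.List.min?_eq_none_iff _ _) rfl
      rw [hnone]
      rfl
  | cons c rest ih =>
      obtain ⟨cname, kws⟩ := c
      by_cases hmatch : kws.any (fun kw => PySem.Str.isIn kw g) = true
      · rcases List.any_eq_true.mp hmatch with ⟨kw, hkw, hin⟩
        have hn_mem : n ∈ hitsOf n ((cname, kws) :: rest) g := by
          rw [hitsOf_cons]
          exact List.mem_append_left _
            (List.mem_map.mpr ⟨kw, List.mem_filter.mpr ⟨hkw, hin⟩, rfl⟩)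
        rw [min?_eq_of _ n hn_mem (hitsOf_lb _ n g)]
        simp only [catScan, if_pos hmatch]
        simp
      · have hfil : kws.filter (fun kw => PySem.Str.isIn kw g) = [] := by
          rw [List.filter_eq_nil_iff]
          intro kw hkw
          have := (List.any_eq_false.mp (Bool.eq_false_iff.mpr hmatch)) kw hkw
          simpa using this
        have hh : hitsOf n ((cname, kws) :: rest) g = hitsOf (n + 1) rest g := by
          rw [hitsOf_cons, hfil]; simp
        have hscan : catScan g ((cname, kws) :: rest) = catScan g rest := by
          simp only [catScan]
          rw [if_neg hmatch]
        rw [hh, hscan, ih (n + 1)]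
        cases hm : PySem.List.min? (hitsOf (n + 1) rest g) (fun x => x) with
        | none => rfl
        | some v =>
            have hv := PySem.List.min?_mem hm
            have hge := hitsOf_lb rest (n + 1) g v hv
            have hidx : (v - n).toNat = (v - (n + 1)).toNat + 1 := by omega
            simp [hidx]

-- catIdxO: B's category index of an optional gloss
def catIdxO : Option String → Int
  | none => 9
  | some s => cat_index s

lemma cat_index_range (g : String) : 0 ≤ cat_index g ∧ cat_index g ≤ 9 := by
  by_cases hg : g = ""
  · simp [cat_index, hg]
  · simp only [cat_index, if_neg hg, flatKW_eq]
    rw [← hitsOf_def]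
    cases hm : PySem.List.min? (hitsOf 0 GLOSS_CATEGORIES (PySem.Str.lower g)) (fun x => x) with
    | none => norm_num
    | some v =>
        have hv := PySem.List.min?_mem hm
        have h1 := hitsOf_lb GLOSS_CATEGORIES 0 (PySem.Str.lower g) v hv
        have h2 := hitsOf_ub GLOSS_CATEGORIES 0 (PySem.Str.lower g) v hv
        have hlen8 : GLOSS_CATEGORIES.length = 8 := rfl
        rw [hlen8] at h2
        show 0 ≤ v ∧ v ≤ 9
        constructor <;> omega

lemma catIdxO_range (o : Option String) : 0 ≤ catIdxO o ∧ catIdxO o ≤ 9 := by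
  cases o with
  | none => exact ⟨by norm_num [catIdxO], by norm_num [catIdxO]⟩
  | some g => exact cat_index_range g

-- A's category name is CATNAMES at B's category index
lemma categorize_eq (o : Option String) :
    categorize_gloss o = CATNAMES.getD (catIdxO o).toNat "OTHER" := by
  cases o with
  | none => rfl
  | some g =>
      by_cases hg : g = ""
      · simp [categorize_gloss, catIdxO, cat_index, hg]; rfl
      · simp only [categorize_gloss, catIdxO, cat_index, if_neg hg, flatKW_eq]
        rw [← hitsOf_def]
        rw [scan_eq_min GLOSS_CATEGORIES 0 (PySem.Str.lower g)]
        cases hm : PySem.List.min? (hitsOf 0 GLOSS_CATEGORIES (PySem.Str.lower g)) (fun x => x) with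
        | none => rfl
        | some v =>
            have hv := PySem.List.min?_mem hm
            have h1 := hitsOf_lb GLOSS_CATEGORIES 0 (PySem.Str.lower g) v hv
            have h2 := hitsOf_ub GLOSS_CATEGORIES 0 (PySem.Str.lower g) v hv
            have hlen8 : GLOSS_CATEGORIES.length = 8 := rfl
            rw [hlen8] at h2
            simp only []
            have hs : v - 0 = v := by omega
            rw [hs]
            have hk : v.toNat < 8 := by omega
            generalize v.toNat = k at hk ⊢
            interval_cases k <;> rfl

-- B's precomputed table agrees with classifying A's dict lookup
lemma table_getD (m : List (String × String)) (k : String) :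
    (PySem.Dict.mk (m.map (fun p => (p.1, cat_index p.2)))).getD k 9
      = catIdxO ((PySem.Dict.mk m).get? k) := by
  induction m with
  | nil => rfl
  | cons p rest ih =>
      simp only [List.map_cons]
      rw [PySem.Dict.getD_eq_get?_getD, PySem.Dict.get?_mk_cons, PySem.Dict.get?_mk_cons]
      cases h : (p.1 == k) with
      | true => simp [catIdxO]
      | false =>
          simp only [Bool.false_eq_true, if_false]
          rw [← PySem.Dict.getD_eq_get?_getD]
          exact ih

lemma names_inj (i j : Nat) (hi : i < 10) (hj : j < 10)
    (h : CATNAMES.getD i "OTHER" = CATNAMES.getD j "OTHER") : i = j := by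
  have : ∀ a b : Fin 10, CATNAMES.getD a.val "OTHER" = CATNAMES.getD b.val "OTHER" → a = b := by decide
  have := this ⟨i, hi⟩ ⟨j, hj⟩ h
  exact congrArg Fin.val this

lemma getD_replicate_zero (n k : Nat) : (List.replicate n (0 : Int)).getD k 0 = 0 := by
  induction n generalizing k with
  | zero => simp
  | succ m ih =>
      cases k with
      | zero => simp [List.replicate_succ]
      | succ l => simp [List.replicate_succ]

lemma sum_set_int (xs : List Int) (n : Nat) (v : Int) (h : n < xs.length) :
    (xs.set n v).sum = xs.sum - xs.getD n 0 + v := by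
  induction xs generalizing n with
  | nil => simp at h
  | cons x t ih =>
      cases n with
      | zero => simp [List.getD]; ring
      | succ k =>
          simp only [List.set_cons_succ, List.sum_cons, List.getD_cons_succ]
          rw [ih k (by simpa using h)]; ring

lemma getD_set_int (xs : List Int) (n m : Nat) (v : Int) (h : n < xs.length) :
    (xs.set n v).getD m 0 = if m = n then v else xs.getD m 0 := by
  induction xs generalizing n m with
  | nil => simp at h
  | cons x t ih =>
      cases n with
      | zero => cases m <;> simp
      | succ k =>
          cases m with
          | zero => simp
          | succ l =>
              simp only [List.set_cons_succ, List.getD_cons_succ]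
              rw [ih k l (by simpa using h)]
              simp

-- the loop invariant relating A's set to B's incidence matrix
def PairInv (S : PySem.Set (String × String)) (seen : List Int) : Prop :=
  seen.length = 100 ∧
  seen.sum = PySem.Set.len S ∧
  (∀ i j : Nat, i < 10 → j < 10 →
     (seen.getD (10 * i + j) 0 = 1 ↔ (CATNAMES.getD i "OTHER", CATNAMES.getD j "OTHER") ∈ S)) ∧
  (∀ x ∈ seen, x = 0 ∨ x = 1)

lemma inv_step (S : PySem.Set (String × String)) (seen : List Int)
    (a b : Int) (ha : 0 ≤ a ∧ a ≤ 9) (hb : 0 ≤ b ∧ b ≤ 9) (h : PairInv S seen) :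
    PairInv (S.add (CATNAMES.getD a.toNat "OTHER", CATNAMES.getD b.toNat "OTHER"))
        (PySem.List.pySetD seen (10 * a + b) 1) := by
  obtain ⟨hlen, hsum, hmem, h01⟩ := h
  have hcast : (10 * a + b) = ((10 * a.toNat + b.toNat : Nat) : Int) := by push_cast; omega
  have hlt : 10 * a.toNat + b.toNat < seen.length := by omega
  rw [hcast, PySem.List.pySetD_natCast]
  have hgetDel : seen.getD (10 * a.toNat + b.toNat) 0 ∈ seen := by
    rw [List.getD_eq_getElem seen 0 hlt]
    exact List.getElem_mem hlt
  by_cases hP : (CATNAMES.getD a.toNat "OTHER", CATNAMES.getD b.toNat "OTHER") ∈ S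
  · have hadd : S.add (CATNAMES.getD a.toNat "OTHER", CATNAMES.getD b.toNat "OTHER") = S := by
      have hc : List.contains S (CATNAMES.getD a.toNat "OTHER", CATNAMES.getD b.toNat "OTHER") = true :=
        List.elem_eq_true_of_mem hP
      simp only [PySem.Set.add, PySem.Set.contains]
      rw [if_pos hc]
    rw [hadd]
    have hone : seen.getD (10 * a.toNat + b.toNat) 0 = 1 :=
      (hmem a.toNat b.toNat (by omega) (by omega)).mpr hP
    refine ⟨by simpa using hlen, ?_, ?_, ?_⟩
    · rw [sum_set_int _ _ _ hlt, hone, hsum]; ring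
    · intro i j hi hj
      rw [getD_set_int _ _ _ _ hlt]
      by_cases he : 10 * i + j = 10 * a.toNat + b.toNat
      · have hij : i = a.toNat ∧ j = b.toNat := by omega
        rw [if_pos he, hij.1, hij.2]
        exact iff_of_true rfl hP
      · rw [if_neg he]; exact hmem i j hi hj
    · intro x hx
      rcases List.mem_or_eq_of_mem_set hx with h | h
      · exact h01 x h
      · right; exact h
  · have hadd : S.add (CATNAMES.getD a.toNat "OTHER", CATNAMES.getD b.toNat "OTHER")
        = S ++ [(CATNAMES.getD a.toNat "OTHER", CATNAMES.getD b.toNat "OTHER")] := by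
      have hc : ¬ (List.contains S (CATNAMES.getD a.toNat "OTHER", CATNAMES.getD b.toNat "OTHER") = true) :=
        fun hct => hP (List.mem_of_elem_eq_true hct)
      simp only [PySem.Set.add, PySem.Set.contains]
      rw [if_neg hc]
    rw [hadd]
    have hzero : seen.getD (10 * a.toNat + b.toNat) 0 = 0 := by
      have hne : seen.getD (10 * a.toNat + b.toNat) 0 ≠ 1 := fun h1 =>
        hP ((hmem a.toNat b.toNat (by omega) (by omega)).mp h1)
      rcases h01 _ hgetDel with h | h
      · exact h
      · exact absurd h hne
    refine ⟨by simpa using hlen, ?_, ?_, ?_⟩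
    · rw [sum_set_int _ _ _ hlt, hzero, hsum]
      simp [PySem.Set.len]
    · intro i j hi hj
      rw [getD_set_int _ _ _ _ hlt]
      by_cases he : 10 * i + j = 10 * a.toNat + b.toNat
      · have hij : i = a.toNat ∧ j = b.toNat := by omega
        rw [if_pos he, hij.1, hij.2]
        exact iff_of_true rfl (List.mem_append_right _ (List.mem_singleton.mpr rfl))
      · rw [if_neg he]
        rw [hmem i j hi hj]
        constructor
        · intro h; exact List.mem_append_left _ h
        · intro h
          rcases List.mem_append.mp h with h | h
          · exact h
          · exfalso
            rcases List.mem_singleton.mp h with heq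
            have h1 : i = a.toNat := names_inj i a.toNat hi (by omega) (congrArg Prod.fst heq)
            have h2 : j = b.toNat := names_inj j b.toNat hj (by omega) (congrArg Prod.snd heq)
            omega
    · intro x hx
      rcases List.mem_or_eq_of_mem_set hx with h | h
      · exact h01 x h
      · right; exact h

lemma inv_fold (m : List (String × String)) (ps : List (String × String))
    (S : PySem.Set (String × String)) (seen : List Int) (h : PairInv S seen) :
    PairInv (ps.foldl (fun cat_pairs st =>
          let s_gloss := (PySem.Dict.mk m).get? st.1
          let t_gloss := (PySem.Dict.mk m).get? st.2
          let s_cat := categorize_gloss s_gloss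
          let t_cat := categorize_gloss t_gloss
          cat_pairs.add (s_cat, t_cat)) S)
        (ps.foldl (fun (seen : List Int) st =>
          PySem.List.pySetD seen
            (10 * (PySem.Dict.mk (m.map (fun p => (p.1, cat_index p.2)))).getD st.1 9
              + (PySem.Dict.mk (m.map (fun p => (p.1, cat_index p.2)))).getD st.2 9) 1) seen) := by
  induction ps generalizing S seen with
  | nil => exact h
  | cons st rest ih =>
      simp only [List.foldl_cons]
      apply ih
      rw [table_getD, table_getD, categorize_eq, categorize_eq]
      exact inv_step _ _ _ _ (catIdxO_range _) (catIdxO_range _) h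

lemma inv_init : PairInv PySem.Set.empty (List.replicate 100 (0 : Int)) := by
  refine ⟨by simp, by simp [PySem.Set.empty, PySem.Set.len], ?_, ?_⟩
  · intro i j hi hj
    constructor
    · intro h1
      rw [getD_replicate_zero] at h1
      exact absurd h1 (by norm_num)
    · intro h; simp [PySem.Set.empty] at h
  · intro x hx; left; exact List.eq_of_mem_replicate hx

-- ===== VERDICT (by name: the statement is the Claim_ definition above) =====
theorem count_distinct_cat_pairs_spec : Claim_equal_count_distinct_cat_pairs := by
  intro m p _
  show count_distinct_cat_pairs m p = count_distinct_cat_pairs_alt m p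
  have h := inv_fold m p PySem.Set.empty (List.replicate 100 (0 : Int)) inv_init
  exact h.2.1.symm
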